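-- pv_equiv track=rewrite | github.com/Arthur-LYR/ProjectShowcase | UniversityProjects/ADS/Sorting/sorting.py | special_string_count_sort_routine
-- ===== SOURCE A (Python) =====
-- def special_string_count_sort_routine(data: list, index: int, column: int, start_index: int) -> list:
--     """ Similar to string_count_sort_routine but takes a list of (key, value) tuples instead.
--
--     :pre: 0 <= start_index <= len(strings) - 1
--     :param data: A list of (key, value) tuples
--     :param index: 0 to sort by key, 1 to sort by value
--     :param column: Column to sort data by
--     :param start_index: Index of first item to include in the sort
--     :return: A list of (key, value) tuples where data[start_index:len(strings)-1] is sorted based on column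
--
--     :best time complexity: O(n) where n = length of data - start_index
--     :worst time complexity: O(n)
--
--     :total space complexity: O(n)
--     :auxiliary space complexity: O(n)
--
--     :see: interest_groups, special_string_rad_sort, string_count_sort_routine
--     """
--     # Initialise Count Array
--     count_array = [None] * 28
--     for i in range(len(count_array)):
--         count_array[i] = []
--
--     # Update Count Array
--     for i in range(start_index, len(data)):
--         item = data[i]
--         current_index = ord(item[index][column]) - 95
--         if current_index >= 1:  # Item is alphabet
--             count_array[current_index].append(item)
--         elif current_index == -63:   # Item is space
--             count_array[0].append(item)
--         else:   # Item is -
--             count_array[1].append(item)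
--
--     # Update Input Array
--     current_index = start_index
--     for i in range(len(count_array)):
--         item = count_array[i]
--         for j in range(len(item)):
--             data[current_index] = item[j]
--             current_index += 1
--
--     # Return Sorted Array
--     return data
-- ===== SOURCE B (Python) =====
-- def special_string_count_sort_routine(data: list, index: int, column: int, start_index: int) -> list:
--     """Stable sort of data[start_index:] in place by the same bucket key, via sorted()."""
--     def key(item):
--         ci = ord(item[index][column]) - 95
--         if ci >= 1:
--             return ci
--         if ci == -63:
--             return 0
--         return 1
--     data[start_index:] = sorted(data[start_index:], key=key)
--     return data
-- ===== Notes on version B (the rewrite author's own statement) =====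
-- stated objective: simpler
-- what changed: Replaces the 28-bucket count-array build and the index-by-index write-back loop with a single slice assignment using Python's stable sorted() on a key function that reproduces the exact bucket index.
import Mathlib
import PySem

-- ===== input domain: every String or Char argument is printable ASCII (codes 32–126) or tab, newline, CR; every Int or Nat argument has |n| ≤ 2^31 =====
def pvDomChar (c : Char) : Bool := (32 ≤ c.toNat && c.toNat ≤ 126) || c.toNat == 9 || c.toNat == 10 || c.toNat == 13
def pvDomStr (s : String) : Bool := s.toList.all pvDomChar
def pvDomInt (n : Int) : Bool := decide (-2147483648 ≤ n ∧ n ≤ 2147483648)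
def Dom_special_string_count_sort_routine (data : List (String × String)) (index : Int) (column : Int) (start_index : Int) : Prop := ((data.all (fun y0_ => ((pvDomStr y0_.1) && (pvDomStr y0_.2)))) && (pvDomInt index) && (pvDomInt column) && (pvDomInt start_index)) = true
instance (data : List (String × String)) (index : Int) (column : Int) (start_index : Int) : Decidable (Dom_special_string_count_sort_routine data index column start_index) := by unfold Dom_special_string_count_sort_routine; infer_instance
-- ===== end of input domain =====

-- B replaces A's 28-bucket count-array build and index-by-index write-back with one stable key-sort of
-- the suffix (simpler). In Python both A and B mutate `data` in place; the theorems are about the return value.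

-- ===== PORT A =====
-- item[index] for a 2-tuple (valid Python tuple indices -2..1; others raise, excluded by Pre_)
def pvPick (p : String × String) (index : Int) : String :=
  if index = 0 ∨ index = -2 then p.1 else p.2

-- item[index][column] (none = IndexError, excluded by Pre_)
def pvChar? (p : String × String) (index : Int) (column : Int) : Option Char :=
  PySem.Str.pyGet? (pvPick p index) column

def special_string_count_sort_routine (data : List (String × String)) (index : Int) (column : Int) (start_index : Int) : List (String × String) :=
  -- Initialise Count Array
  let count_array : List (List (String × String)) := List.replicate 28 []
  -- Update Count Array
  let count_array := (PySem.List.pyRange start_index (PySem.List.len data)).foldl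
    (fun ca i =>
      let item := PySem.List.pyGetD data i ("", "")
      match pvChar? item index column with
      | none => ca   -- IndexError in Python; outside Pre_
      | some c =>
        let current_index : Int := (c.toNat : Int) - 95
        let b : Int := if 1 ≤ current_index then current_index
                       else if current_index = -63 then 0 else 1
        PySem.List.pySetD ca b (PySem.List.pyGetD ca b [] ++ [item]))
    count_array
  -- Update Input Array (data[current_index] = item[j]; current_index += 1)
  (count_array.foldl
    (fun (st : List (String × String) × Int) bucket =>
      bucket.foldl (fun st x => (PySem.List.pySetD st.1 st.2 x, st.2 + 1)) st)
    (data, start_index)).1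

-- ===== PORT B =====
-- B's key function: the exact bucket index as an Int (the 0 default is the IndexError case, outside Pre_)
def pvKey (index : Int) (column : Int) (p : String × String) : Int :=
  match pvChar? p index column with
  | none => 0
  | some c =>
    let ci : Int := (c.toNat : Int) - 95
    if 1 ≤ ci then ci else if ci = -63 then 0 else 1

-- data[:start_index] ++ sorted(data[start_index:], key=key)
def special_string_count_sort_routine_alt (data : List (String × String)) (index : Int) (column : Int) (start_index : Int) : List (String × String) :=
  PySem.List.slice data none (some start_index) ++
    PySem.List.sorted (PySem.List.slice data (some start_index) none) (pvKey index column)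

-- ===== PRECONDITION & SPEC =====
-- the sorted item's character exists and has code ≤ 122 (else A's bucket index overflows: IndexError)
def pvOkChar (index : Int) (column : Int) (p : String × String) : Bool :=
  match pvChar? p index column with
  | some c => c.toNat ≤ 122
  | none => false

-- Pre_ excludes negative start_index (outside the docstring's stated pre `0 <= start_index`), where A's
-- negative-index wraparound reads tail items twice and returns a corrupted list with duplicated entries;
-- everything else excluded here is an input on which A raises (tuple/string/bucket IndexError).
def Pre_special_string_count_sort_routine (data : List (String × String)) (index : Int) (column : Int) (start_index : Int) : Prop :=
  0 ≤ start_index ∧ (data.drop start_index.toNat = [] ∨ (-2 ≤ index ∧ index ≤ 1)) ∧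
    ∀ p ∈ data.drop start_index.toNat, pvOkChar index column p = true
instance (data : List (String × String)) (index : Int) (column : Int) (start_index : Int) : Decidable (Pre_special_string_count_sort_routine data index column start_index) := by unfold Pre_special_string_count_sort_routine; infer_instance

def pvWitness_special_string_count_sort_routine : (List (String × String)) × Int × Int × Int :=
  ([("ba", "x"), ("ab", "y"), ("aa", "z")], 0, 0, 1)

def Spec_special_string_count_sort_routine (data : List (String × String)) (index : Int) (column : Int) (start_index : Int) (out : List (String × String)) : Prop := out = special_string_count_sort_routine_alt data index column start_index
instance (data : List (String × String)) (index : Int) (column : Int) (start_index : Int) (out : List (String × String)) : Decidable (Spec_special_string_count_sort_routine data index column start_index out) := by unfold Spec_special_string_count_sort_routine; infer_instance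

-- ===== CLAIM (what is proved, stated in full; the proofs are below) =====
def Claim_equal_special_string_count_sort_routine : Prop := ∀ (data : List (String × String)) (index : Int) (column : Int) (start_index : Int), Dom_special_string_count_sort_routine data index column start_index → Pre_special_string_count_sort_routine data index column start_index → Spec_special_string_count_sort_routine data index column start_index (special_string_count_sort_routine data index column start_index)

-- ===== LEMMAS AND PROOFS =====

theorem insertBy_append_skip {α : Type} (bef : α → α → Bool) (x : α) (l1 l2 : List α)
    (h : ∀ a ∈ l1, bef x a = false) :
    PySem.List.insertBy bef x (l1 ++ l2) = l1 ++ PySem.List.insertBy bef x l2 := by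
  induction l1 with
  | nil => rfl
  | cons a t ih =>
    have ha : bef x a = false := h a (by simp)
    show (if bef x a then _ else _) = _
    simp [ha, ih fun b hb => h b (by simp [hb])]

theorem flatten_set_append {α : Type} (key : α → Int) (x : α) :
    ∀ (ca : List (List α)) (o : Int) (n : Nat) (hn : n < ca.length),
    (∀ (i : Nat) (hi : i < ca.length), ∀ y ∈ ca[i], key y = o + i) →
    key x = o + n →
    (ca.set n (ca[n] ++ [x])).flatten
      = PySem.List.insertBy (fun a b => decide (key a < key b)) x ca.flatten := by
  intro ca
  induction ca with
  | nil => intro o n hn; simp at hn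
  | cons c cs ih =>
    intro o n hn hinv hx
    have hkc : ∀ a ∈ c, (decide (key x < key a)) = false := by
      intro a ha
      have h0 : key a = o := by simpa using hinv 0 (by simp) a ha
      simp only [decide_eq_false_iff_not, h0, hx, not_lt]; omega
    cases n with
    | zero =>
      simp only [List.set_cons_zero, List.getElem_cons_zero, List.flatten_cons]
      rw [insertBy_append_skip _ x c _ hkc, List.append_assoc]
      congr 1
      cases hfl : cs.flatten with
      | nil => rfl
      | cons h t =>
        have hh : h ∈ cs.flatten := by simp [hfl]
        obtain ⟨l, hl, hmem⟩ := List.mem_flatten.1 hh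
        obtain ⟨j, hj, rfl⟩ := List.mem_iff_getElem.1 hl
        have hkey : key h = o + (j + 1) := by
          have := hinv (j + 1) (by simpa using hj) h hmem
          push_cast at this ⊢; omega
        show _ = (if decide (key x < key h) then _ else _)
        have : decide (key x < key h) = true := by
          simp only [decide_eq_true_iff, hkey, hx]; omega
        simp [this]
    | succ m =>
      simp only [List.set_cons_succ, List.getElem_cons_succ, List.flatten_cons]
      have hx' : key x = (o + 1) + m := by push_cast at hx ⊢; omega
      rw [ih (o + 1) m (by simpa using hn) (by
        intro i hi y hy
        have := hinv (i + 1) (by simpa using hi) y (by simpa using hy)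
        push_cast at this ⊢; omega) hx']
      rw [insertBy_append_skip _ x c _ hkc]

def pvStep (index column : Int) (ca : List (List (String × String))) (item : String × String) :
    List (List (String × String)) :=
  match pvChar? item index column with
  | none => ca
  | some c =>
    let current_index : Int := (c.toNat : Int) - 95
    let b : Int := if 1 ≤ current_index then current_index
                   else if current_index = -63 then 0 else 1
    PySem.List.pySetD ca b (PySem.List.pyGetD ca b [] ++ [item])

def pvInv (index column : Int) (ca : List (List (String × String))) : Prop :=
  ca.length = 28 ∧ ∀ (i : Nat) (hi : i < ca.length), ∀ y ∈ ca[i], pvKey index column y = (i : Int)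

theorem pvStep_flatten (index column : Int) (item : String × String)
    (hok : pvOkChar index column item = true) (ca : List (List (String × String)))
    (hinv : pvInv index column ca) :
    (pvStep index column ca item).flatten
        = PySem.List.insertBy (fun a b => decide (pvKey index column a < pvKey index column b))
            item ca.flatten
      ∧ pvInv index column (pvStep index column ca item) := by
  obtain ⟨hlen, hgrp⟩ := hinv
  unfold pvOkChar at hok
  unfold pvStep
  cases hc : pvChar? item index column with
  | none => rw [hc] at hok; simp at hok
  | some c =>
    rw [hc] at hok
    dsimp only at hok ⊢
    simp only [decide_eq_true_eq] at hok
    set ci : Int := (c.toNat : Int) - 95 with hci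
    set b : Int := if 1 ≤ ci then ci else if ci = -63 then 0 else 1 with hb
    have hb0 : 0 ≤ b := by rw [hb]; split_ifs <;> omega
    have hb27 : b ≤ 27 := by rw [hb]; split_ifs <;> omega
    have hbn : b.toNat < ca.length := by omega
    have hkey : pvKey index column item = b := by unfold pvKey; rw [hc]
    have hset : PySem.List.pySetD ca b (PySem.List.pyGetD ca b [] ++ [item])
        = ca.set b.toNat (ca[b.toNat] ++ [item]) := by
      rw [PySem.List.pySetD_of_nonneg _ _ hb0]
      congr 1
      rw [PySem.List.pyGetD_of_nonneg _ _ hb0, List.getD_eq_getElem _ _ hbn]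
    constructor
    · rw [hset]
      exact flatten_set_append (pvKey index column) item ca 0 b.toNat hbn
        (by intro i hi y hy; simpa using hgrp i hi y hy)
        (by rw [hkey]; omega)
    · rw [hset]
      refine ⟨by simpa using hlen, ?_⟩
      intro i hi y hy
      by_cases hib : i = b.toNat
      · subst hib
        rw [List.getElem_set_self] at hy
        rcases List.mem_append.1 hy with h | h
        · exact hgrp b.toNat (by simpa using hi) y h
        · simp at h; subst h; rw [hkey]; omega
      · rw [List.getElem_set_ne (by omega)] at hy
        exact hgrp i (by simpa using hi) y hy

theorem pvFold_flatten (index column : Int) :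
    ∀ (l : List (String × String)) (ca : List (List (String × String))),
    (∀ p ∈ l, pvOkChar index column p = true) → pvInv index column ca →
    (l.foldl (pvStep index column) ca).flatten
        = l.foldl (fun acc x =>
            PySem.List.insertBy (fun a b => decide (pvKey index column a < pvKey index column b)) x acc)
            ca.flatten
      ∧ pvInv index column (l.foldl (pvStep index column) ca) := by
  intro l
  induction l with
  | nil => intro ca _ hinv; exact ⟨rfl, hinv⟩
  | cons x t ih =>
    intro ca hok hinv
    obtain ⟨h1, h2⟩ := pvStep_flatten index column x (hok x (by simp)) ca hinv
    obtain ⟨h3, h4⟩ := ih (pvStep index column ca x) (fun p hp => hok p (by simp [hp])) h2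
    exact ⟨by simpa [h1] using h3, h4⟩

theorem write_foldl {α : Type} :
    ∀ (ws pre rest : List α), ws.length ≤ rest.length →
    (ws.foldl (fun (st : List α × Int) x => (PySem.List.pySetD st.1 st.2 x, st.2 + 1))
        (pre ++ rest, (pre.length : Int))).1
      = pre ++ ws ++ rest.drop ws.length := by
  intro ws
  induction ws with
  | nil => intro pre rest _; simp
  | cons w t ih =>
    intro pre rest hlen
    cases rest with
    | nil => simp at hlen
    | cons r rs =>
      simp only [List.foldl_cons]
      have hset : PySem.List.pySetD (pre ++ r :: rs) (pre.length : Int) w = (pre ++ [w]) ++ rs := by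
        rw [PySem.List.pySetD_of_nonneg _ _ (by positivity)]
        rw [Int.toNat_natCast, List.set_append_right _ _ (le_refl _)]
        simp
      rw [hset]
      have : ((pre.length : Int) + 1) = (((pre ++ [w]).length : Nat) : Int) := by simp
      rw [this, ih (pre ++ [w]) rs (by simpa using hlen)]
      simp

theorem main_thm (data : List (String × String)) (index : Int) (column : Int) (start_index : Int)
    (h0 : 0 ≤ start_index)
    (hok : ∀ p ∈ data.drop start_index.toNat, pvOkChar index column p = true) :
    special_string_count_sort_routine data index column start_index
      = special_string_count_sort_routine_alt data index column start_index := by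
  have hs : start_index = (start_index.toNat : Int) := (Int.toNat_of_nonneg h0).symm
  set s' : Nat := start_index.toNat with hs'
  unfold special_string_count_sort_routine special_string_count_sort_routine_alt
  dsimp only
  -- B side: slices to take/drop
  rw [hs, PySem.List.slice_to_natCast, PySem.List.slice_from_natCast]
  -- A side step 1: range fold = fold over the tail
  have h1 : (PySem.List.pyRange (s' : Int) (PySem.List.len data)).foldl
      (fun ca i =>
        let item := PySem.List.pyGetD data i ("", "")
        match pvChar? item index column with
        | none => ca
        | some c =>
          let current_index : Int := (c.toNat : Int) - 95
          let b : Int := if 1 ≤ current_index then current_index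
                         else if current_index = -63 then 0 else 1
          PySem.List.pySetD ca b (PySem.List.pyGetD ca b [] ++ [item]))
      (List.replicate 28 [])
      = (data.drop s').foldl (pvStep index column) (List.replicate 28 []) := by
    have := PySem.List.foldl_pyRange_pyGetD data ("", "") (pvStep index column)
      (List.replicate 28 []) (a := (s' : Int)) (by positivity)
    simpa using this
  rw [h1]
  -- step 2: flatten of the buckets is the stable sort of the tail
  have hinv0 : pvInv index column (List.replicate 28 []) := by
    refine ⟨by simp, ?_⟩
    intro i hi y hy
    rw [List.getElem_replicate] at hy
    simp at hy
  obtain ⟨hfl, _⟩ := pvFold_flatten index column (data.drop s')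
    (List.replicate 28 []) hok hinv0
  have hws : ((data.drop s').foldl (pvStep index column) (List.replicate 28 [])).flatten
      = PySem.List.sorted (data.drop s') (pvKey index column) := by
    rw [hfl, PySem.List.sorted_eq_foldl_insertBy]
    simp
  -- step 3: nested write-back fold = fold over the flattened buckets
  rw [← List.foldl_flatten, hws]
  -- step 4
  set ws := PySem.List.sorted (data.drop s') (pvKey index column) with hwsdef
  have hlen : ws.length = (data.drop s').length :=
    (PySem.List.sorted_perm (data.drop s') (pvKey index column) false).length_eq
  by_cases hcase : data.length < s'
  · have htail : data.drop s' = [] := List.drop_eq_nil_of_le (by omega)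
    have : ws = [] := by rw [hwsdef, htail]; rfl
    rw [this]
    simp [List.take_of_length_le (le_of_lt hcase)]
  · rw [not_lt] at hcase
    have hpre : ((data.take s').length : Int) = (s' : Int) := by
      rw [List.length_take]; congr 1; omega
    have hsplit : data = data.take s' ++ data.drop s' := (List.take_append_drop _ _).symm
    calc (ws.foldl (fun st x => (PySem.List.pySetD st.1 st.2 x, st.2 + 1)) (data, (s' : Int))).1
        = (ws.foldl (fun st x => (PySem.List.pySetD st.1 st.2 x, st.2 + 1))
            (data.take s' ++ data.drop s', ((data.take s').length : Int))).1 := by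
          rw [← hsplit, hpre]
      _ = data.take s' ++ ws ++ (data.drop s').drop ws.length :=
          write_foldl ws (data.take s') (data.drop s') (le_of_eq hlen)
      _ = data.take s' ++ ws := by rw [hlen, List.drop_length]; simp


-- ===== VERDICT (by name: the statement is the Claim_ definition above) =====
theorem special_string_count_sort_routine_spec : Claim_equal_special_string_count_sort_routine := by
  intro data index column start_index _ hpre
  obtain ⟨h0, _, hok⟩ := hpre
  exact main_thm data index column start_index h0 hok
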